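-- pv_equiv track=rewrite | github.com/alibaba/ChatLearn | chatlearn/models/agent/agent_manager.py | group_dictionaries
-- ===== SOURCE A (Python) =====
-- import heapq
--
-- def group_dictionaries(data, num_groups=8, group_size=256, length_key='all_token_length'):
--     """
--     将字典列表按 length_key 的值进行负载均衡分组，每组最多 group_size 个元素。
--
--     参数:
--     - data: 字典列表，每个字典包含 length_key 字段
--     - num_groups: 分成多少组（默认16）
--     - group_size: 每组最多多少个元素（默认128）
--     - length_key: 用于表示长度的键名（如 'length', 'len' 等）
--
--     返回:
--     - 列表，包含num_groups个组，每组是字典的列表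
--     """
--     # 按 length_key 从大到小排序（优先处理长的）
--     sorted_data = sorted(data, key=lambda x: x[length_key], reverse=True)
--
--     # 初始化最小堆：(当前总长度, 组索引, 组内元素列表)
--     heap = [(0, i, []) for i in range(num_groups)]
--     heapq.heapify(heap)
--
--     # 存储已满的组
--     full_groups = []
--
--     # 贪心分配
--     for item in sorted_data:
--         # 如果堆为空，说明所有组都满了
--         if not heap:
--             break
--
--         # 取出当前总长度最小的组
--         total_len, idx, group = heapq.heappop(heap)
--
--         # 添加当前元素到组中
--         group.append(item)
--         new_total_len = total_len + item[length_key]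
--
--         # 检查该组是否已满
--         if len(group) >= group_size:
--             # 组已满，加入到full_groups，不再放回堆中
--             full_groups.append((new_total_len, idx, group))
--         else:
--             # 组未满，放回堆中继续参与分配
--             heapq.heappush(heap, (new_total_len, idx, group))
--
--     # 合并结果：堆中未满的组 + 已满的组
--     all_groups = []
--     # 添加堆中剩余的未满组
--     while heap:
--         total_len, idx, group = heapq.heappop(heap)
--         all_groups.append((idx, group))
--
--     # 添加已满的组
--     for total_len, idx, group in full_groups:
--         all_groups.append((idx, group))
--
--     # 按组索引排序并提取结果
--     result = [group for idx, group in sorted(all_groups, key=lambda x: x[0])]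
--
--     flattened_result = [item for sublist in result for item in sublist]
--
--     return flattened_result
-- ===== SOURCE B (Python) =====
-- def group_dictionaries(data, num_groups=8, group_size=256, length_key='all_token_length'):
--     # No heap: fixed bucket/total/active arrays with a linear argmin scan.
--     order = sorted(data, key=lambda x: x[length_key], reverse=True)
--     n = num_groups if num_groups > 0 else 0
--     buckets = [[] for _ in range(n)]
--     totals = [0] * n
--     active = [True] * n
--     out = []
--     for item in order:
--         best = -1
--         for i in range(n):
--             if active[i] and (best < 0 or totals[i] < totals[best]):
--                 best = i
--         if best < 0:
--             break
--         buckets[best].append(item)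
--         totals[best] += item[length_key]
--         if len(buckets[best]) >= group_size:
--             active[best] = False
--     for b in buckets:
--         out.extend(b)
--     return out
-- ===== Notes on version B (the rewrite author's own statement) =====
-- stated objective: simpler
-- what changed: Replaces the heap of (total, idx, group) tuples plus a separate full_groups list and a final sort-by-index with fixed per-group (total, bucket, active) state updated via a linear argmin scan; buckets are concatenated in index order, so no heap and no final sort.
import Mathlib
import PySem

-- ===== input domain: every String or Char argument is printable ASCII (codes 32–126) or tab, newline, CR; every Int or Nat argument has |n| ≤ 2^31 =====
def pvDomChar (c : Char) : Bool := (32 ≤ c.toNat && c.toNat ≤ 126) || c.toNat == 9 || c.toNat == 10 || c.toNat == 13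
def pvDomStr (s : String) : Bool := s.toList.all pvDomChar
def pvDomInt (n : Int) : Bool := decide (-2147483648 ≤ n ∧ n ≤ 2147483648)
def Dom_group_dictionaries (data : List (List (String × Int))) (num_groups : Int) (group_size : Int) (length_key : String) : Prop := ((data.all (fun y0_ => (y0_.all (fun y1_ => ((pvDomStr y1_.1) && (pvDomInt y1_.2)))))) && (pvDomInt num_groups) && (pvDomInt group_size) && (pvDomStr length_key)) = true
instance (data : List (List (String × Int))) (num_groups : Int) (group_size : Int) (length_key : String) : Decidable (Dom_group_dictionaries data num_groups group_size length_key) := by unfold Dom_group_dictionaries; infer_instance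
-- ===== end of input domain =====

-- B replaces A's heap + full_groups + final sort-by-index with fixed per-group state
-- (total, bucket, active) updated through a linear argmin scan; buckets are concatenated
-- in index order at the end.  Objective: simpler.  Equivalence is about the return value
-- (neither program mutates its arguments).

abbrev PvDict := List (String × Int)
-- heap entry: (running total, group index, group contents)
abbrev PvHE := Int × Int × List PvDict
-- B's per-group state: (running total, bucket, still active)
abbrev PvST := Int × List PvDict × Bool

-- ===== PORT A =====
-- models Python's d[k] (first match; the KeyError case is excluded by Pre_)
def pvDget (d : PvDict) (k : String) : Int :=
  ((d.find? (fun p => p.1 == k)).map (·.2)).getD 0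

-- heapq key comparison on (total, idx); the group component is never compared because
-- group indices are pairwise distinct
def pvLeKey (x y : PvHE) : Bool :=
  decide (x.1 < y.1 ∨ (x.1 = y.1 ∧ x.2.1 ≤ y.2.1))

-- heapq modeled as a bag: heappop extracts the unique (total, idx)-minimal entry,
-- heappush appends; with distinct idx keys this is exactly heapq's observable behaviour
def pvPopMin : List PvHE → Option (PvHE × List PvHE)
  | [] => none
  | x :: xs =>
    match pvPopMin xs with
    | none => some (x, [])
    | some (m, rest) => if pvLeKey x m then some (x, xs) else some (m, x :: rest)

theorem pvPopMin_eq_none : ∀ {l : List PvHE}, pvPopMin l = none ↔ l = [] := by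
  intro l
  cases l with
  | nil => simp [pvPopMin]
  | cons x xs =>
    simp only [pvPopMin]
    cases hx : pvPopMin xs with
    | none => simp
    | some p => obtain ⟨m, rest⟩ := p; simp only []; split <;> simp

theorem pvPopMin_perm : ∀ {l : List PvHE} {m rest}, pvPopMin l = some (m, rest) → l.Perm (m :: rest) := by
  intro l
  induction l with
  | nil => intro m rest h; simp [pvPopMin] at h
  | cons x xs ih =>
    intro m rest h
    simp only [pvPopMin] at h
    cases hx : pvPopMin xs with
    | none =>
      rw [hx] at h
      obtain rfl : xs = [] := pvPopMin_eq_none.mp hx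
      cases h
      exact List.Perm.refl _
    | some p =>
      obtain ⟨m', rest'⟩ := p
      rw [hx] at h
      have hperm := ih hx
      by_cases hle : pvLeKey x m' = true
      · simp only [if_pos hle] at h; cases h
        exact List.Perm.refl _
      · simp only [if_neg hle] at h; cases h
        exact (hperm.cons x).trans (List.Perm.swap _ _ _)

theorem pvPopMin_length {l : List PvHE} {m rest} (h : pvPopMin l = some (m, rest)) : rest.length + 1 = l.length := by
  have := (pvPopMin_perm h).length_eq
  simp at this
  omega

-- A's greedy assignment loop over the sorted data
def pvLoopA (group_size : Int) (length_key : String) :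
    List PvDict → List PvHE → List PvHE → List PvHE × List PvHE
  | [], heap, full => (heap, full)
  | item :: rest, heap, full =>
    match pvPopMin heap with
    | none => (heap, full)
    | some ((t, i, g), heap') =>
      let g' := g ++ [item]
      let t' := t + pvDget item length_key
      if group_size ≤ (g'.length : Int) then
        pvLoopA group_size length_key rest heap' (full ++ [(t', i, g')])
      else
        pvLoopA group_size length_key rest (heap' ++ [(t', i, g')]) full

-- 'while heap: heappop' drain
def pvDrain (heap : List PvHE) : List (Int × List PvDict) :=
  match h : pvPopMin heap with
  | none => []
  | some (m, rest) => (m.2.1, m.2.2) :: pvDrain rest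
termination_by heap.length
decreasing_by have := pvPopMin_length h; omega

def group_dictionaries (data : List (List (String × Int))) (num_groups : Int) (group_size : Int) (length_key : String) : List (List (String × Int)) :=
  let sorted_data := PySem.List.sorted data (fun x => pvDget x length_key) true
  let heap0 : List PvHE := (PySem.List.pyRange 0 num_groups 1).map (fun i => (0, i, []))
  let hf := pvLoopA group_size length_key sorted_data heap0 []
  let all_groups := pvDrain hf.1 ++ hf.2.map (fun e => (e.2.1, e.2.2))
  let result := (PySem.List.sorted all_groups (fun p => p.1) false).map (fun p => p.2)
  result.flatten

-- ===== PORT B =====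
-- the linear scan 'for i in range(n): if active[i] and (best < 0 or totals[i] < totals[best])'
def pvBestAux : List PvST → Nat → Option (Nat × Int) → Option (Nat × Int)
  | [], _, acc => acc
  | e :: rest, i, acc =>
    let acc' :=
      if e.2.2 then
        match acc with
        | none => some (i, e.1)
        | some (_, tb) => if e.1 < tb then some (i, e.1) else acc
      else acc
    pvBestAux rest (i + 1) acc'

def pvBest (st : List PvST) : Option (Nat × Int) := pvBestAux st 0 none

-- B's assignment loop: update the chosen slot in place
def pvLoopB (group_size : Int) (length_key : String) :
    List PvDict → List PvST → List PvST
  | [], st => st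
  | item :: rest, st =>
    match pvBest st with
    | none => st
    | some (b, _) =>
      pvLoopB group_size length_key rest
        (st.modify b (fun e =>
          let g' := e.2.1 ++ [item]
          (e.1 + pvDget item length_key, g', decide ((g'.length : Int) < group_size))))

def group_dictionaries_alt (data : List (List (String × Int))) (num_groups : Int) (group_size : Int) (length_key : String) : List (List (String × Int)) :=
  let order := PySem.List.sorted data (fun x => pvDget x length_key) true
  let n : Nat := num_groups.toNat   -- n = max(num_groups, 0)
  let st0 : List PvST := List.replicate n (0, [], true)
  let stF := pvLoopB group_size length_key order st0
  stF.foldl (fun acc e => acc ++ e.2.1) []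

-- ===== PRECONDITION & SPEC =====
-- Pre_ excludes exactly the inputs where Python A raises KeyError: some dict in data
-- lacks length_key (B raises the same way; nothing A returns on is excluded).
def Pre_group_dictionaries (data : List (List (String × Int))) (num_groups : Int) (group_size : Int) (length_key : String) : Prop :=
  ∀ d ∈ data, length_key ∈ d.map (·.1)
instance (data : List (List (String × Int))) (num_groups : Int) (group_size : Int) (length_key : String) : Decidable (Pre_group_dictionaries data num_groups group_size length_key) := by unfold Pre_group_dictionaries; infer_instance

def pvWitness_group_dictionaries : (List (List (String × Int))) × Int × Int × String :=
  ([[("L", 3)], [("L", 1)], [("L", 2)]], 2, 2, "L")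

def Spec_group_dictionaries (data : List (List (String × Int))) (num_groups : Int) (group_size : Int) (length_key : String) (out : List (List (String × Int))) : Prop := out = group_dictionaries_alt data num_groups group_size length_key
instance (data : List (List (String × Int))) (num_groups : Int) (group_size : Int) (length_key : String) (out : List (List (String × Int))) : Decidable (Spec_group_dictionaries data num_groups group_size length_key out) := by unfold Spec_group_dictionaries; infer_instance

-- ===== CLAIM (what is proved, stated in full; the proofs are below) =====
def Claim_equal_group_dictionaries : Prop := ∀ (data : List (List (String × Int))) (num_groups : Int) (group_size : Int) (length_key : String), Dom_group_dictionaries data num_groups group_size length_key → Pre_group_dictionaries data num_groups group_size length_key → Spec_group_dictionaries data num_groups group_size length_key (group_dictionaries data num_groups group_size length_key)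

-- ===== LEMMAS AND PROOFS =====

theorem pvLeKey_refl (x : PvHE) : pvLeKey x x = true := by simp [pvLeKey]

theorem pvLeKey_trans {x y z : PvHE} (h1 : pvLeKey x y = true) (h2 : pvLeKey y z = true) : pvLeKey x z = true := by
  simp only [pvLeKey, decide_eq_true_eq] at *
  omega

theorem pvLeKey_total {x y : PvHE} (h : ¬ pvLeKey x y = true) : pvLeKey y x = true := by
  simp only [pvLeKey, decide_eq_true_eq] at *
  omega

theorem pvPopMin_min : ∀ {l : List PvHE} {m rest}, pvPopMin l = some (m, rest) → ∀ y ∈ l, pvLeKey m y = true := by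
  intro l
  induction l with
  | nil => intro m rest h; simp [pvPopMin] at h
  | cons x xs ih =>
    intro m rest h y hy
    simp only [pvPopMin] at h
    cases hx : pvPopMin xs with
    | none =>
      rw [hx] at h
      obtain rfl : xs = [] := pvPopMin_eq_none.mp hx
      cases h
      simp at hy
      subst hy
      exact pvLeKey_refl _
    | some p =>
      obtain ⟨m', rest'⟩ := p
      rw [hx] at h
      by_cases hle : pvLeKey x m' = true
      · simp only [if_pos hle] at h; cases h
        rcases List.mem_cons.mp hy with rfl | hy'
        · exact pvLeKey_refl _
        · exact pvLeKey_trans hle (ih hx y hy')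
      · simp only [if_neg hle] at h; cases h
        rcases List.mem_cons.mp hy with rfl | hy'
        · exact pvLeKey_total hle
        · exact ih hx y hy'


-- the invariant linking A's (heap, full_groups) to B's per-slot state
def PvInv (heap full : List PvHE) (st : List PvST) : Prop :=
  (∀ e, e ∈ heap ↔ ∃ i : Nat, ∃ h : i < st.length, st[i].2.2 = true ∧ e = (st[i].1, (i : Int), st[i].2.1)) ∧
  (∀ e, e ∈ full ↔ ∃ i : Nat, ∃ h : i < st.length, st[i].2.2 = false ∧ e = (st[i].1, (i : Int), st[i].2.1)) ∧
  (heap.map (fun e => e.2.1)).Nodup ∧ (full.map (fun e => e.2.1)).Nodup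

theorem pvBestAux_main : ∀ (st : List PvST) (i : Nat) (acc : Option (Nat × Int)),
    (∀ b tb, acc = some (b, tb) → b < i) →
    ( (pvBestAux st i acc = none ↔ (acc = none ∧ ∀ k (_ : k < st.length), st[k].2.2 = false))
    ∧ ∀ b tb, pvBestAux st i acc = some (b, tb) →
        ( (acc = some (b, tb) ∨ ∃ k, ∃ _ : k < st.length, b = i + k ∧ st[k].2.2 = true ∧ tb = st[k].1)
        ∧ (∀ b0 t0, acc = some (b0, t0) → tb < t0 ∨ (tb = t0 ∧ b ≤ b0))
        ∧ (∀ k (_ : k < st.length), st[k].2.2 = true → tb < st[k].1 ∨ (tb = st[k].1 ∧ b ≤ i + k)) ) ) := by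
  intro st
  induction st with
  | nil =>
    intro i acc hacc
    refine ⟨by simp [pvBestAux], ?_⟩
    intro b tb h
    simp only [pvBestAux] at h
    refine ⟨Or.inl h, ?_, by simp⟩
    intro b0 t0 h0
    rw [h] at h0
    cases h0
    exact Or.inr ⟨rfl, le_refl _⟩
  | cons e rest ih =>
    intro i acc hacc
    have hred : ∀ acc', (if e.2.2 then
        match acc with
        | none => some (i, e.1)
        | some (_, tb) => if e.1 < tb then some (i, e.1) else acc
      else acc) = acc' → pvBestAux (e :: rest) i acc = pvBestAux rest (i + 1) acc' := by
      intro acc' h'; simp only [pvBestAux]; rw [h']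
    by_cases he : e.2.2 = true
    · -- slot i active
      rcases hacc' : (match acc with
        | none => some (i, e.1)
        | some (_, tb) => if e.1 < tb then some (i, e.1) else acc) with _ | ⟨b', tb'⟩
      · exfalso
        rcases acc with _ | ⟨b0, t0⟩ <;> simp only [] at hacc'
        · cases hacc'
        · split at hacc' <;> cases hacc'
      · have hstep : pvBestAux (e :: rest) i acc = pvBestAux rest (i + 1) (some (b', tb')) := by
          apply hred; rw [if_pos he]; exact hacc'
        have hb'lt : b' < i + 1 := by
          rcases acc with _ | ⟨b0, t0⟩ <;> simp only [] at hacc'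
          · cases hacc'; omega
          · by_cases hlt : e.1 < t0
            · rw [if_pos hlt] at hacc'; cases hacc'; omega
            · rw [if_neg hlt] at hacc'; cases hacc'
              exact Nat.lt_succ_of_lt (hacc _ _ rfl)
        obtain ⟨N, M⟩ := ih (i + 1) (some (b', tb')) (by intro b tb h; cases h; exact hb'lt)
        constructor
        · constructor
          · intro hnone
            rw [hstep, N] at hnone
            exact absurd hnone.1 (by simp)
          · rintro ⟨_, h2⟩
            have h0 : e.2.2 = false := by simpa using h2 0 (by simp)
            rw [he] at h0; cases h0
        · intro b tb h
          rw [hstep] at h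
          obtain ⟨Mm, Macc, Ment⟩ := M b tb h
          have hvse : tb < e.1 ∨ (tb = e.1 ∧ b ≤ i) := by
            have h1 := Macc b' tb' rfl
            rcases acc with _ | ⟨b0, t0⟩ <;> simp only [] at hacc'
            · cases hacc'; exact h1
            · by_cases hlt : e.1 < t0
              · rw [if_pos hlt] at hacc'; cases hacc'; exact h1
              · rw [if_neg hlt] at hacc'; cases hacc'
                have hb0i := hacc _ _ rfl
                rcases h1 with h1 | ⟨h1, h2⟩ <;> omega
          have hvsacc : ∀ b0 t0, acc = some (b0, t0) → tb < t0 ∨ (tb = t0 ∧ b ≤ b0) := by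
            intro b0 t0 h0
            subst h0
            simp only [] at hacc'
            by_cases hlt : e.1 < t0
            · rw [if_pos hlt] at hacc'; cases hacc'
              rcases hvse with h1 | ⟨h1, _⟩ <;> omega
            · rw [if_neg hlt] at hacc'; cases hacc'
              exact Macc _ _ rfl
          refine ⟨?_, hvsacc, ?_⟩
          · rcases Mm with hMm | ⟨k, hk, rfl, hact, rfl⟩
            · cases hMm
              rcases acc with _ | ⟨b0, t0⟩ <;> simp only [] at hacc'
              · cases hacc'
                exact Or.inr ⟨0, by simp, by omega, by simpa using he, by simp⟩
              · by_cases hlt : e.1 < t0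
                · rw [if_pos hlt] at hacc'; cases hacc'
                  exact Or.inr ⟨0, by simp, by omega, by simpa using he, by simp⟩
                · rw [if_neg hlt] at hacc'; cases hacc'
                  exact Or.inl rfl
            · exact Or.inr ⟨k + 1, by simpa using Nat.succ_lt_succ hk, by omega, by simpa using hact, by simp⟩
          · intro k hk hkact
            cases k with
            | zero => simpa using hvse
            | succ k' =>
              have hk' : k' < rest.length := by simpa using hk
              rcases Ment k' hk' (by simpa using hkact) with h1 | ⟨h1, h2⟩
              · exact Or.inl h1
              · exact Or.inr ⟨h1, by omega⟩
    · -- slot i inactive: accumulator unchanged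
      have hstep : pvBestAux (e :: rest) i acc = pvBestAux rest (i + 1) acc := by
        apply hred; rw [if_neg he]
      obtain ⟨N, M⟩ := ih (i + 1) acc (fun b tb h => Nat.lt_succ_of_lt (hacc b tb h))
      constructor
      · rw [hstep, N]
        constructor
        · rintro ⟨h1, h2⟩
          refine ⟨h1, ?_⟩
          intro k hk
          cases k with
          | zero => simpa using (by simpa using he : e.2.2 = false)
          | succ k' => simpa using h2 k' (by simpa using hk)
        · rintro ⟨h1, h2⟩
          exact ⟨h1, fun k hk => by simpa using h2 (k + 1) (by simpa using Nat.succ_lt_succ hk)⟩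
      · intro b tb h
        rw [hstep] at h
        obtain ⟨Mm, Macc, Ment⟩ := M b tb h
        refine ⟨?_, Macc, ?_⟩
        · rcases Mm with hMm | ⟨k, hk, rfl, hact, rfl⟩
          · exact Or.inl hMm
          · exact Or.inr ⟨k + 1, by simpa using Nat.succ_lt_succ hk, by omega, by simpa using hact, by simp⟩
        · intro k hk hkact
          cases k with
          | zero => exact absurd (by simpa using hkact) he
          | succ k' =>
            have hk' : k' < rest.length := by simpa using hk
            rcases Ment k' hk' (by simpa using hkact) with h1 | ⟨h1, h2⟩
            · exact Or.inl h1
            · exact Or.inr ⟨h1, by omega⟩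

theorem pvBest_none {st : List PvST} : pvBest st = none ↔ ∀ k (_ : k < st.length), st[k].2.2 = false := by
  have := (pvBestAux_main st 0 none (by simp)).1
  unfold pvBest
  rw [this]
  simp

theorem pvBest_some {st : List PvST} {b : Nat} {tb : Int} (h : pvBest st = some (b, tb)) :
    ∃ _ : b < st.length, st[b].2.2 = true ∧ tb = st[b].1 ∧
      ∀ k (_ : k < st.length), st[k].2.2 = true → tb < st[k].1 ∨ (tb = st[k].1 ∧ b ≤ k) := by
  obtain ⟨Mm, _, Ment⟩ := (pvBestAux_main st 0 none (by simp)).2 b tb h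
  rcases Mm with hMm | ⟨k, hk, hbk, hact, htb⟩
  · cases hMm
  · obtain rfl : b = k := by omega
    refine ⟨hk, hact, htb, ?_⟩
    intro k' hk' hact'
    rcases Ment k' hk' hact' with h1 | ⟨h1, h2⟩
    · exact Or.inl h1
    · exact Or.inr ⟨h1, by omega⟩

theorem pvLoopA_inv (gs : Int) (lk : String) (items : List PvDict) :
    ∀ heap full st, PvInv heap full st →
      PvInv (pvLoopA gs lk items heap full).1 (pvLoopA gs lk items heap full).2
        (pvLoopB gs lk items st) := by
  induction items with
  | nil => intro heap full st h; simpa [pvLoopA, pvLoopB] using h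
  | cons item rest ih =>
    intro heap full st hinv
    obtain ⟨H1, H2, H3, H4⟩ := hinv
    cases hpop : pvPopMin heap with
    | none =>
      have hheap : heap = [] := pvPopMin_eq_none.mp hpop
      have hbest : pvBest st = none := by
        rw [pvBest_none]
        intro k hk
        by_contra hkact
        have hkt : st[k].2.2 = true := by revert hkact; cases (st[k].2.2) <;> simp
        have : (st[k].1, (k : Int), st[k].2.1) ∈ heap := (H1 _).mpr ⟨k, hk, hkt, rfl⟩
        rw [hheap] at this; cases this
      simp only [pvLoopA, pvLoopB, hpop, hbest]
      exact ⟨H1, H2, H3, H4⟩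
    | some p =>
      obtain ⟨⟨t, i, g⟩, heap'⟩ := p
      have hperm := pvPopMin_perm hpop
      have hmem : (t, i, g) ∈ heap := hperm.mem_iff.mpr (List.mem_cons_self ..)
      obtain ⟨i0, hi0len, hi0act, heq⟩ := (H1 _).mp hmem
      simp only [Prod.mk.injEq] at heq
      obtain ⟨rfl, hi, rfl⟩ := heq
      cases hbest : pvBest st with
      | none =>
        exfalso
        have := pvBest_none.mp hbest i0 hi0len
        rw [hi0act] at this; cases this
      | some q =>
        obtain ⟨b, tb⟩ := q
        obtain ⟨hblen, hbact, htb, hbmin⟩ := pvBest_some hbest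
        have hEb : (st[b].1, (b : Int), st[b].2.1) ∈ heap := (H1 _).mpr ⟨b, hblen, hbact, rfl⟩
        have hle := pvPopMin_min hpop _ hEb
        simp only [pvLeKey, decide_eq_true_eq] at hle
        have hmin2 := hbmin i0 hi0len hi0act
        have hib : i0 = b := by
          rcases hle with h1 | ⟨h1, h2⟩ <;> rcases hmin2 with h3 | ⟨h3, h4⟩ <;> omega
        subst hib
        subst hi
        -- shape of B's updated state
        have hlen' : (st.modify i0 (fun e =>
            (e.1 + pvDget item lk, e.2.1 ++ [item], decide (((e.2.1 ++ [item]).length : Int) < gs)))).length = st.length :=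
          List.length_modify ..
        have hget' : ∀ j (hj : j < st.length),
            (st.modify i0 (fun e =>
              (e.1 + pvDget item lk, e.2.1 ++ [item], decide (((e.2.1 ++ [item]).length : Int) < gs))))[j]'(by omega) =
            if i0 = j then (st[j].1 + pvDget item lk, st[j].2.1 ++ [item],
                decide (((st[j].2.1 ++ [item]).length : Int) < gs))
            else st[j] := by
          intro j hj
          exact List.getElem_modify ..
        -- heap-remainder facts
        have hnodupc : (((st[i0].1, (i0 : Int), st[i0].2.1) :: heap').map (fun e => e.2.1)).Nodup :=
          ((hperm.map (fun e => e.2.1)).nodup_iff).mp H3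
        have hni : (i0 : Int) ∉ heap'.map (fun e => e.2.1) := by
          have := List.nodup_cons.mp hnodupc
          simpa using this.1
        have hnodup' : (heap'.map (fun e => e.2.1)).Nodup := (List.nodup_cons.mp hnodupc).2
        have hmem' : ∀ y, y ∈ heap' ↔ (y ∈ heap ∧ y.2.1 ≠ (i0 : Int)) := by
          intro y
          constructor
          · intro hy
            refine ⟨hperm.mem_iff.mpr (List.mem_cons_of_mem _ hy), ?_⟩
            intro hyc
            exact hni (hyc ▸ List.mem_map_of_mem hy)
          · rintro ⟨hy, hyne⟩
            rcases List.mem_cons.mp (hperm.mem_iff.mp hy) with rfl | hy'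
            · exact absurd rfl hyne
            · exact hy'
        -- the updated state satisfies the invariant with A's updated heap/full
        have hstep : ∀ (heap2 full2 : List PvHE),
            PvInv heap2 full2 (st.modify i0 (fun e =>
              (e.1 + pvDget item lk, e.2.1 ++ [item], decide (((e.2.1 ++ [item]).length : Int) < gs)))) →
            PvInv (pvLoopA gs lk rest heap2 full2).1 (pvLoopA gs lk rest heap2 full2).2
              (pvLoopB gs lk rest (st.modify i0 (fun e =>
                (e.1 + pvDget item lk, e.2.1 ++ [item], decide (((e.2.1 ++ [item]).length : Int) < gs))))) :=
          fun heap2 full2 h2 => ih heap2 full2 _ h2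
        by_cases hfull : gs ≤ ((st[i0].2.1 ++ [item]).length : Int)
        · -- the chosen group becomes full
          have hdec : decide (((st[i0].2.1 ++ [item]).length : Int) < gs) = false := by
            simp only [decide_eq_false_iff_not]; omega
          simp only [pvLoopA, pvLoopB, hpop, hbest, if_pos hfull]
          apply hstep
          refine ⟨?_, ?_, hnodup', ?_⟩
          · intro e
            constructor
            · intro he'
              obtain ⟨he, hne⟩ := (hmem' e).mp he'
              obtain ⟨j, hj, hact, rfl⟩ := (H1 e).mp he
              have hjb : j ≠ i0 := by intro hc; subst hc; exact hne rfl
              refine ⟨j, by omega, ?_⟩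
              rw [hget' j hj, if_neg (fun hc => hjb hc.symm)]
              exact ⟨hact, rfl⟩
            · rintro ⟨j, hj, hact', rfl⟩
              have hj' : j < st.length := by omega
              rw [hget' j hj'] at hact' ⊢
              by_cases hjb : i0 = j
              · subst hjb
                rw [if_pos rfl, hdec] at hact'
                cases hact'
              · rw [if_neg hjb] at hact' ⊢
                exact (hmem' _).mpr ⟨(H1 _).mpr ⟨j, hj', hact', rfl⟩, by
                  simp only [ne_eq, Int.natCast_inj]
                  exact fun hc => hjb hc.symm⟩
          · intro e
            rw [List.mem_append, List.mem_singleton]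
            constructor
            · rintro (he | rfl)
              · obtain ⟨j, hj, hact, rfl⟩ := (H2 e).mp he
                have hjb : j ≠ i0 := by
                  intro hc; subst hc; rw [hi0act] at hact; cases hact
                refine ⟨j, by omega, ?_⟩
                rw [hget' j hj, if_neg (fun hc => hjb hc.symm)]
                exact ⟨hact, rfl⟩
              · refine ⟨i0, by omega, ?_⟩
                rw [hget' i0 hi0len, if_pos rfl, hdec]
                exact ⟨rfl, rfl⟩
            · rintro ⟨j, hj, hact', rfl⟩
              have hj' : j < st.length := by omega
              rw [hget' j hj'] at hact' ⊢
              by_cases hjb : i0 = j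
              · subst hjb
                rw [if_pos rfl]
                exact Or.inr rfl
              · rw [if_neg hjb] at hact' ⊢
                exact Or.inl ((H2 _).mpr ⟨j, hj', hact', rfl⟩)
          · rw [List.map_append, List.nodup_append]
            refine ⟨H4, by simp, ?_⟩
            intro a ha bb hbb
            simp only [List.map_cons, List.map_nil, List.mem_singleton] at hbb
            subst hbb
            obtain ⟨ea, hea, rfl⟩ := List.mem_map.mp ha
            obtain ⟨j, hj, hact, rfl⟩ := (H2 ea).mp hea
            simp only [ne_eq, Int.natCast_inj]
            intro hc; subst hc; rw [hi0act] at hact; cases hact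
        · -- the chosen group stays active
          have hdec : decide (((st[i0].2.1 ++ [item]).length : Int) < gs) = true := by
            simp only [decide_eq_true_eq]; omega
          simp only [pvLoopA, pvLoopB, hpop, hbest, if_neg hfull]
          apply hstep
          refine ⟨?_, ?_, ?_, H4⟩
          · intro e
            rw [List.mem_append, List.mem_singleton]
            constructor
            · rintro (he' | rfl)
              · obtain ⟨he, hne⟩ := (hmem' e).mp he'
                obtain ⟨j, hj, hact, rfl⟩ := (H1 e).mp he
                have hjb : j ≠ i0 := by intro hc; subst hc; exact hne rfl
                refine ⟨j, by omega, ?_⟩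
                rw [hget' j hj, if_neg (fun hc => hjb hc.symm)]
                exact ⟨hact, rfl⟩
              · refine ⟨i0, by omega, ?_⟩
                rw [hget' i0 hi0len, if_pos rfl, hdec]
                exact ⟨rfl, rfl⟩
            · rintro ⟨j, hj, hact', rfl⟩
              have hj' : j < st.length := by omega
              rw [hget' j hj'] at hact' ⊢
              by_cases hjb : i0 = j
              · subst hjb
                rw [if_pos rfl]
                exact Or.inr rfl
              · rw [if_neg hjb] at hact' ⊢
                refine Or.inl ((hmem' _).mpr ⟨(H1 _).mpr ⟨j, hj', hact', rfl⟩, ?_⟩)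
                simp only [ne_eq, Int.natCast_inj]
                exact fun hc => hjb hc.symm
          · intro e
            constructor
            · intro he
              obtain ⟨j, hj, hact, rfl⟩ := (H2 e).mp he
              have hjb : j ≠ i0 := by
                intro hc; subst hc; rw [hi0act] at hact; cases hact
              refine ⟨j, by omega, ?_⟩
              rw [hget' j hj, if_neg (fun hc => hjb hc.symm)]
              exact ⟨hact, rfl⟩
            · rintro ⟨j, hj, hact', rfl⟩
              have hj' : j < st.length := by omega
              rw [hget' j hj'] at hact' ⊢
              by_cases hjb : i0 = j
              · subst hjb
                rw [if_pos rfl, hdec] at hact'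
                cases hact'
              · rw [if_neg hjb] at hact' ⊢
                exact (H2 _).mpr ⟨j, hj', hact', rfl⟩
          · rw [List.map_append, List.nodup_append]
            refine ⟨hnodup', by simp, ?_⟩
            intro a ha bb hbb
            simp only [List.map_cons, List.map_nil, List.mem_singleton] at hbb
            subst hbb
            obtain ⟨ea, hea, rfl⟩ := List.mem_map.mp ha
            exact ((hmem' ea).mp hea).2

theorem pvDrain_perm : ∀ (heap : List PvHE), (pvDrain heap).Perm (heap.map (fun e => (e.2.1, e.2.2))) := by
  intro heap
  induction hn : heap.length using Nat.strong_induction_on generalizing heap with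
  | _ n ihn =>
    rw [pvDrain]
    cases hpop : pvPopMin heap with
    | none =>
      obtain rfl : heap = [] := pvPopMin_eq_none.mp hpop
      simp
    | some p =>
      obtain ⟨m, rest⟩ := p
      have hperm := pvPopMin_perm hpop
      have hlen := pvPopMin_length hpop
      have ihr := ihn rest.length (by omega) rest rfl
      exact (ihr.cons (m.2.1, m.2.2)).trans
        (show ((m :: rest).map (fun e => (e.2.1, e.2.2))).Perm (heap.map (fun e => (e.2.1, e.2.2))) from
          (hperm.map _).symm)

theorem pvFinal (heap full : List PvHE) (st : List PvST) (h : PvInv heap full st) :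
    ((PySem.List.sorted (pvDrain heap ++ full.map (fun e => (e.2.1, e.2.2))) (fun p => p.1) false).map (fun p => p.2)).flatten
      = st.foldl (fun acc e => acc ++ e.2.1) [] := by
  obtain ⟨H1, H2, H3, H4⟩ := h
  have hsorted : PySem.List.sorted (pvDrain heap ++ full.map (fun e => (e.2.1, e.2.2))) (fun p => p.1) false
      = PySem.List.enumerate (st.map (fun e => e.2.1)) 0 := by
    apply PySem.List.sorted_eq_of_perm_of_pairwise_lt
    · -- the enumeration is a permutation of drained heap ++ full
      have hdp := pvDrain_perm heap
      have hperm1 : (pvDrain heap ++ full.map (fun e => (e.2.1, e.2.2))).Perm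
          ((heap ++ full).map (fun e => (e.2.1, e.2.2))) := by
        rw [List.map_append]
        exact hdp.append_right _
      refine (List.perm_of_nodup_nodup_toFinset_eq ?_ ?_ ?_).trans hperm1.symm
      · -- enumerate is nodup: its first components form a range
        apply List.Nodup.of_map (f := fun p => p.1)
        rw [PySem.List.map_fst_enumerate]
        exact PySem.List.nodup_pyRange_one ..
      · -- (heap ++ full) has pairwise distinct indices
        apply List.Nodup.of_map (f := fun p => p.1)
        rw [List.map_map]
        have hmm : ((heap ++ full).map ((fun p : Int × List PvDict => p.1) ∘ (fun e : PvHE => (e.2.1, e.2.2))))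
            = heap.map (fun e => e.2.1) ++ full.map (fun e => e.2.1) := by simp [Function.comp_def]
        rw [hmm, List.nodup_append]
        refine ⟨H3, H4, ?_⟩
        intro a ha bb hb
        obtain ⟨ea, hea, rfl⟩ := List.mem_map.mp ha
        obtain ⟨eb, heb, rfl⟩ := List.mem_map.mp hb
        obtain ⟨j, hj, hact, rfl⟩ := (H1 _).mp hea
        obtain ⟨k, hk, hinact, rfl⟩ := (H2 _).mp heb
        simp only [ne_eq, Int.natCast_inj]
        intro hc
        subst hc
        rw [hact] at hinact
        cases hinact
      · ext p
        simp only [List.mem_toFinset]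
        rw [PySem.List.mem_enumerate_iff]
        constructor
        · rintro ⟨k, hk, rfl⟩
          have hk' : k < st.length := by simpa using hk
          rw [List.mem_map]
          by_cases hact : st[k].2.2 = true
          · refine ⟨(st[k].1, (k : Int), st[k].2.1), List.mem_append_left _ ((H1 _).mpr ⟨k, hk', hact, rfl⟩), ?_⟩
            simp
          · have hact' : st[k].2.2 = false := by revert hact; cases (st[k].2.2) <;> simp
            refine ⟨(st[k].1, (k : Int), st[k].2.1), List.mem_append_right _ ((H2 _).mpr ⟨k, hk', hact', rfl⟩), ?_⟩
            simp
        · intro hp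
          obtain ⟨e, he, rfl⟩ := List.mem_map.mp hp
          rcases List.mem_append.mp he with he' | he'
          · obtain ⟨j, hj, _, rfl⟩ := (H1 _).mp he'
            exact ⟨j, by simpa using hj, by simp⟩
          · obtain ⟨j, hj, _, rfl⟩ := (H2 _).mp he'
            exact ⟨j, by simpa using hj, by simp⟩
    · exact PySem.List.pairwise_lt_enumerate ..
  rw [hsorted, PySem.List.map_snd_enumerate, PySem.List.foldl_append_eq_flatMap]
  simp [List.flatMap_def]

-- ===== VERDICT (by name: the statement is the Claim_ definition above) =====
theorem group_dictionaries_spec : Claim_equal_group_dictionaries := by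
  intro data num_groups group_size length_key _ _
  unfold Spec_group_dictionaries group_dictionaries group_dictionaries_alt
  simp only []
  apply pvFinal
  apply pvLoopA_inv
  refine ⟨?_, ?_, ?_, by simp⟩
  · intro e
    rw [List.mem_map]
    constructor
    · rintro ⟨x, hx, rfl⟩
      rw [PySem.List.mem_pyRange_one] at hx
      have hxt : x.toNat < (List.replicate num_groups.toNat ((0 : Int), ([] : List PvDict), true)).length := by
        simp; omega
      refine ⟨x.toNat, hxt, ?_, ?_⟩
      · rw [List.getElem_replicate]
      · rw [List.getElem_replicate]
        simp [Int.toNat_of_nonneg hx.1]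
    · rintro ⟨j, hj, _, rfl⟩
      have hj' : j < num_groups.toNat := by simpa using hj
      refine ⟨(j : Int), ?_, ?_⟩
      · rw [PySem.List.mem_pyRange_one]
        constructor
        · positivity
        · omega
      · rw [List.getElem_replicate]
  · intro e
    constructor
    · intro h; cases h
    · rintro ⟨j, hj, hfalse, _⟩
      rw [List.getElem_replicate] at hfalse
      cases hfalse
  · rw [List.map_map]
    simpa [Function.comp_def] using PySem.List.nodup_pyRange_one (a := 0) (b := num_groups)
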